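-- pv_equiv track=rewrite | github.com/tbrodbeck/InspiredByNature | knapsack_problem/knapsack_final.py | fchc_transpose_neighbour
-- ===== SOURCE A (Python) =====
-- import itertools
--
-- MAX_WEIGHT = 400
--
-- w0 = [10,   300,  1,    200,  100]
--
-- v0 = [1000, 4000, 5000, 5000, 2000]
--
-- def calc_value(array):
--     ''' calculates total value of sack
--     @param v: array of values
--     @param array: binary choice value array'''
--     V = 0
--     for index, val in enumerate(array):
--         if val == 1:
--             V += v0[index]
--
--     return V
--
-- def calc_weight(x):
--     ''' calculates total weight of sack
--     @param w: weight array
--     @param x: binary choice value array'''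
--     W = 0
--     for index, val in enumerate(x):
--         if val == 1:
--             W += w0[index]
--
--     return W
--
-- def fchc_transpose_neighbour(x):
--     old_v = calc_value(x) #calculate current value of sack
--     n = list(itertools.combinations(range(len(x)), 2)) #list of all possible 2 place swaps by index
--
--     for tup in n: #for ea tuple of possible swap
--         if x[tup[0]] != x[tup[1]]: #if the swap is not same value
--             r = x.copy()
--             r[tup[0]], r[tup[1]] = r[tup[1]], r[tup[0]] #make swap
--             v = calc_value(r)
--             w = calc_weight(r)
--             if v > old_v and w <= MAX_WEIGHT:
--                 x = r
--                 break
--     return x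
-- ===== SOURCE B (Python) =====
-- import itertools
--
-- MAX_WEIGHT = 400
--
-- w0 = [10,   300,  1,    200,  100]
--
-- v0 = [1000, 4000, 5000, 5000, 2000]
--
-- def fchc_transpose_neighbour(x):
--     # Totals once; each candidate swap is then scored with O(1) deltas
--     # instead of copying the sack and re-scanning it.
--     old_v = sum(v0[i] for i, val in enumerate(x) if val == 1)
--     old_w = sum(w0[i] for i, val in enumerate(x) if val == 1)
--     for i, j in itertools.combinations(range(len(x)), 2):
--         a, b = x[i], x[j]
--         if (a == 1) != (b == 1):  # only swaps that move the single 1 can change value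
--             gained, lost = (j, i) if a == 1 else (i, j)
--             new_v = old_v + v0[gained] - v0[lost]
--             new_w = old_w + w0[gained] - w0[lost]
--             if new_v > old_v and new_w <= MAX_WEIGHT:
--                 r = x.copy()
--                 r[i], r[j] = r[j], r[i]
--                 return r
--     return x
-- ===== Notes on version B (the rewrite author's own statement) =====
-- stated objective: faster
-- what changed: B computes the sack's total value and weight once and scores each candidate 2-swap with O(1) value/weight deltas (skipping swaps that cannot change the value), instead of copying the list and re-scanning it for every index pair.
-- outside the precondition, e.g. on fchc_transpose_neighbour([1, 0, 0, 0, 0, 0]): A returns [0, 1, 0, 0, 0, 0], B returns [0, 1, 0, 0, 0, 0]; on fchc_transpose_neighbour([0, 0, 0, 0, 0, 1]): A raises IndexError, B raises IndexError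
import Mathlib
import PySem

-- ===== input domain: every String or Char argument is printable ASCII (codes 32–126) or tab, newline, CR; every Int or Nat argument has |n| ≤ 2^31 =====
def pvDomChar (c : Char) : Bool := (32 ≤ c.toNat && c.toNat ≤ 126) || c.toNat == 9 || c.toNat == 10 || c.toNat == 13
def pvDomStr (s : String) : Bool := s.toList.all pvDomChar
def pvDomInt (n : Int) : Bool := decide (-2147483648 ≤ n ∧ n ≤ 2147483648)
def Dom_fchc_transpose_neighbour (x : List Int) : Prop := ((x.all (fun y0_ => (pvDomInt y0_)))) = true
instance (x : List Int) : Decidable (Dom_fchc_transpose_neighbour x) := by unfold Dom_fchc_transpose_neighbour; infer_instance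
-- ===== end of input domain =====

-- B replaces A's per-swap list copy + full value/weight re-scan by one upfront total and
-- O(1) deltas per candidate pair (objective: faster, O(n^2) vs O(n^3)).

-- shared module constants (w0 / v0 of the Python module)
def wConst : List Int := [10, 300, 1, 200, 100]
def vConst : List Int := [1000, 4000, 5000, 5000, 2000]

-- list(itertools.combinations(range n, 2)) in CPython's lexicographic order, as Nat pairs
def combos (n : Nat) : List (Nat × Nat) :=
  (List.range n).flatMap (fun i => ((List.range n).drop (i + 1)).map (fun j => (i, j)))

-- ===== PORT A =====
-- calc_value: 'for index, val in enumerate(array): if val == 1: V += v0[index]'.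
-- v0[index] raises IndexError in Python for index ≥ 5; ported with pyGetD default 0,
-- exact on Pre_ (which excludes the raising inputs).
def calc_value (array : List Int) : Int :=
  (PySem.List.enumerate array 0).foldl
    (fun V p => if p.2 = 1 then V + PySem.List.pyGetD vConst p.1 0 else V) 0

def calc_weight (x : List Int) : Int :=
  (PySem.List.enumerate x 0).foldl
    (fun W p => if p.2 = 1 then W + PySem.List.pyGetD wConst p.1 0 else W) 0

-- the for-loop over the pair list, with 'break' as an early return; x[i] for i from
-- combos (len x) is always in range, ported as getD
def fchcLoopA (x : List Int) (oldv : Int) : List (Nat × Nat) → List Int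
  | [] => x
  | (i, j) :: rest =>
    if x.getD i 0 ≠ x.getD j 0 then
      let r := (x.set i (x.getD j 0)).set j (x.getD i 0)
      let v := calc_value r
      let w := calc_weight r
      if v > oldv ∧ w ≤ 400 then r else fchcLoopA x oldv rest
    else fchcLoopA x oldv rest

def fchc_transpose_neighbour (x : List Int) : List Int :=
  fchcLoopA x (calc_value x) (combos x.length)

-- ===== PORT B =====
-- 'sum(c[i] for i, val in enumerate(x) if val == 1)'
def bTotal (c : List Int) (x : List Int) : Int :=
  (((PySem.List.enumerate x 0).filter (fun p => p.2 == 1)).map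
    (fun p => PySem.List.pyGetD c p.1 0)).sum

def fchcLoopB (x : List Int) (oldv oldw : Int) : List (Nat × Nat) → List Int
  | [] => x
  | (i, j) :: rest =>
    let a := x.getD i 0
    let b := x.getD j 0
    if ((a == 1) != (b == 1)) then
      let gained := if a = 1 then j else i
      let lost := if a = 1 then i else j
      let nv := oldv + vConst.getD gained 0 - vConst.getD lost 0
      let nw := oldw + wConst.getD gained 0 - wConst.getD lost 0
      if nv > oldv ∧ nw ≤ 400 then (x.set i b).set j a
      else fchcLoopB x oldv oldw rest
    else fchcLoopB x oldv oldw rest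

def fchc_transpose_neighbour_alt (x : List Int) : List Int :=
  fchcLoopB x (bTotal vConst x) (bTotal wConst x) (combos x.length)

-- ===== PRECONDITION & SPEC =====
-- Pre_ excludes lists longer than 5 that contain a 1: on those the Python indexes the
-- 5-element v0/w0 tables out of range and can raise IndexError (whether it actually
-- raises depends on which swap breaks the loop first, so some such inputs still return).
def Pre_fchc_transpose_neighbour (x : List Int) : Prop := x.length ≤ 5 ∨ ¬ (1 ∈ x)
instance (x : List Int) : Decidable (Pre_fchc_transpose_neighbour x) := by
  unfold Pre_fchc_transpose_neighbour; infer_instance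

def pvWitness_fchc_transpose_neighbour : List Int := [1, 0, 1, 0, 0]

def Spec_fchc_transpose_neighbour (x : List Int) (out : List Int) : Prop := out = fchc_transpose_neighbour_alt x
instance (x : List Int) (out : List Int) : Decidable (Spec_fchc_transpose_neighbour x out) := by unfold Spec_fchc_transpose_neighbour; infer_instance

-- ===== CLAIM (what is proved, stated in full; the proofs are below) =====
def Claim_equal_fchc_transpose_neighbour : Prop := ∀ (x : List Int), Dom_fchc_transpose_neighbour x → Pre_fchc_transpose_neighbour x → Spec_fchc_transpose_neighbour x (fchc_transpose_neighbour x)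

-- ===== LEMMAS AND PROOFS =====

-- the common closed form of both totals: Σ_{k < len x} (if x[k] = 1 then c[k] else 0)
def calcGen (c x : List Int) : Int :=
  ∑ k ∈ Finset.range x.length, (if x.getD k 0 = 1 then c.getD k 0 else 0)

theorem fold_enum (c x : List Int) : ∀ (s acc : Int),
    (PySem.List.enumerate x s).foldl
      (fun V p => if p.2 = 1 then V + PySem.List.pyGetD c p.1 0 else V) acc
    = acc + ∑ k ∈ Finset.range x.length,
        (if x.getD k 0 = 1 then PySem.List.pyGetD c (s + k) 0 else 0) := by
  induction x with
  | nil => intro s acc; simp [PySem.List.enumerate_nil]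
  | cons a xs ih =>
    intro s acc
    rw [PySem.List.enumerate_cons]
    simp only [List.foldl_cons, List.length_cons]
    rw [Finset.sum_range_succ', ih (s+1)]
    simp only [List.getD_cons_succ, List.getD_cons_zero]
    have : ∀ k : Nat, s + 1 + (k : Int) = s + ((k : Nat) + 1 : Nat) := by
      intro k; push_cast; ring
    by_cases ha : a = 1 <;> (simp [ha, this]; try ring)

theorem calc_value_eq (x : List Int) : calc_value x = calcGen vConst x := by
  unfold calc_value calcGen
  rw [fold_enum]
  simp

-- filter/map/sum genexp = the same fold

theorem calc_weight_eq (x : List Int) : calc_weight x = calcGen wConst x := by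
  unfold calc_weight calcGen
  rw [fold_enum]
  simp

theorem filter_map_sum (c : List Int) (l : List (Int × Int)) : ∀ acc : Int,
    acc + ((l.filter (fun p => p.2 == 1)).map (fun p => PySem.List.pyGetD c p.1 0)).sum
    = l.foldl (fun V p => if p.2 = 1 then V + PySem.List.pyGetD c p.1 0 else V) acc := by
  induction l with
  | nil => simp
  | cons p l ih =>
    intro acc
    by_cases hp : p.2 = 1 <;> (simp [hp, ← ih]; try ring)

theorem bTotal_eq (c x : List Int) : bTotal c x = calcGen c x := by
  unfold bTotal calcGen
  have := filter_map_sum c (PySem.List.enumerate x 0) 0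
  rw [zero_add] at this
  rw [this, fold_enum]
  simp

theorem sum_two_point (n : Nat) (f g : Nat → Int) (i j : Nat) (hi : i < n) (hj : j < n)
    (hij : i ≠ j) (h : ∀ k, k ≠ i → k ≠ j → g k = f k) :
    ∑ k ∈ Finset.range n, g k
      = (∑ k ∈ Finset.range n, f k) - f i - f j + g i + g j := by
  have hi' : i ∈ Finset.range n := Finset.mem_range.mpr hi
  have hj' : j ∈ (Finset.range n).erase i := Finset.mem_erase.mpr ⟨Ne.symm hij, Finset.mem_range.mpr hj⟩
  have congr2 : ∑ k ∈ ((Finset.range n).erase i).erase j, g k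
      = ∑ k ∈ ((Finset.range n).erase i).erase j, f k := by
    apply Finset.sum_congr rfl
    intro k hk
    have h1 := Finset.mem_erase.mp hk
    have h2 := Finset.mem_erase.mp h1.2
    exact h k h2.1 h1.1
  rw [← Finset.add_sum_erase _ g hi', ← Finset.add_sum_erase _ g hj',
      ← Finset.add_sum_erase _ f hi', ← Finset.add_sum_erase _ f hj', congr2]
  ring

theorem calcGen_swap (c x : List Int) (i j : Nat) (hi : i < x.length) (hj : j < x.length)
    (hij : i ≠ j) :
    calcGen c ((x.set i (x.getD j 0)).set j (x.getD i 0))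
      = calcGen c x
        - (if x.getD i 0 = 1 then c.getD i 0 else 0)
        - (if x.getD j 0 = 1 then c.getD j 0 else 0)
        + (if x.getD j 0 = 1 then c.getD i 0 else 0)
        + (if x.getD i 0 = 1 then c.getD j 0 else 0) := by
  unfold calcGen
  set x' := (x.set i (x.getD j 0)).set j (x.getD i 0) with hx'
  have hlen : x'.length = x.length := by simp [hx']
  have hgd : ∀ k, k ≠ i → k ≠ j → x'.getD k 0 = x.getD k 0 := by
    intro k hki hkj
    simp [hx', List.getD, List.getElem?_set_ne (Ne.symm hki), List.getElem?_set_ne (Ne.symm hkj)]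
  have hgi : x'.getD i 0 = x.getD j 0 := by
    have : x'[i]? = some (x.getD j 0) := by
      rw [hx']
      rw [List.getElem?_set_ne (Ne.symm hij)]
      rw [List.getElem?_set_self hi]
    simp [List.getD, this]
  have hgj : x'.getD j 0 = x.getD i 0 := by
    have : x'[j]? = some (x.getD i 0) := by
      rw [hx', List.getElem?_set_self (by simpa using hj)]
    simp [List.getD, this]
  rw [hlen]
  rw [sum_two_point x.length (fun k => if x.getD k 0 = 1 then c.getD k 0 else 0)
      (fun k => if x'.getD k 0 = 1 then c.getD k 0 else 0) i j hi hj hij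
      (fun k hki hkj => by simp only [hgd k hki hkj])]
  rw [hgi, hgj]

theorem combos_valid (n : Nat) : ∀ p ∈ combos n, p.1 < p.2 ∧ p.2 < n := by
  intro p hp
  simp only [combos, List.mem_flatMap, List.mem_map] at hp
  obtain ⟨i, hi, j, hj, rfl⟩ := hp
  have hjr : j ∈ List.range n := List.mem_of_mem_drop hj
  rw [List.range_eq_range', List.drop_range'] at hj
  simp only [Nat.zero_add, Nat.mul_one] at hj
  have := List.mem_range'_1.mp hj
  simp only [List.mem_range] at hjr
  exact ⟨by omega, hjr⟩


theorem loop_eq (x : List Int) (pairs : List (Nat × Nat))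
    (hp : ∀ p ∈ pairs, p.1 < p.2 ∧ p.2 < x.length) :
    fchcLoopA x (calcGen vConst x) pairs
      = fchcLoopB x (calcGen vConst x) (calcGen wConst x) pairs := by
  induction pairs with
  | nil => rfl
  | cons p rest ih =>
    obtain ⟨i, j⟩ := p
    have hij := hp (i, j) List.mem_cons_self
    have hrest : ∀ p ∈ rest, p.1 < p.2 ∧ p.2 < x.length :=
      fun p hp' => hp p (List.mem_cons_of_mem _ hp')
    have hi : i < x.length := lt_trans hij.1 hij.2
    have hj : j < x.length := hij.2
    have hne : i ≠ j := Nat.ne_of_lt hij.1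
    simp only [fchcLoopA, fchcLoopB]
    by_cases hab : x.getD i 0 = x.getD j 0
    · rw [if_neg (not_not_intro hab),
          if_neg (by rw [hab, bne_self_eq_false]; exact Bool.false_ne_true)]
      exact ih hrest
    · have hv := calcGen_swap vConst x i j hi hj hne
      have hw := calcGen_swap wConst x i j hi hj hne
      by_cases ha : x.getD i 0 = 1 <;> by_cases hb : x.getD j 0 = 1
      · exact absurd (ha.trans hb.symm) hab
      · -- the 1 at i moves to j: delta = c[j] - c[i]
        have hveq : calc_value ((x.set i (x.getD j 0)).set j (x.getD i 0))
            = calcGen vConst x + vConst.getD j 0 - vConst.getD i 0 := by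
          rw [calc_value_eq, hv, if_pos ha, if_neg hb, if_pos ha, if_neg hb]; ring
        have hweq : calc_weight ((x.set i (x.getD j 0)).set j (x.getD i 0))
            = calcGen wConst x + wConst.getD j 0 - wConst.getD i 0 := by
          rw [calc_weight_eq, hw, if_pos ha, if_neg hb, if_pos ha, if_neg hb]; ring
        rw [if_pos hab, if_pos (show ((x.getD i 0 == 1) != (x.getD j 0 == 1)) = true by
          simp only [ha, bne_iff_ne, ne_eq]
          intro h; exact hb (by simpa using h.symm))]
        simp only [if_pos ha]
        rw [hveq, hweq]
        split_ifs with hgo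
        · rfl
        · exact ih hrest
      · -- the 1 at j moves to i: delta = c[i] - c[j]
        have hveq : calc_value ((x.set i (x.getD j 0)).set j (x.getD i 0))
            = calcGen vConst x + vConst.getD i 0 - vConst.getD j 0 := by
          rw [calc_value_eq, hv, if_neg ha, if_pos hb, if_pos hb, if_neg ha]; ring
        have hweq : calc_weight ((x.set i (x.getD j 0)).set j (x.getD i 0))
            = calcGen wConst x + wConst.getD i 0 - wConst.getD j 0 := by
          rw [calc_weight_eq, hw, if_neg ha, if_pos hb, if_pos hb, if_neg ha]; ring
        rw [if_pos hab, if_pos (show ((x.getD i 0 == 1) != (x.getD j 0 == 1)) = true by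
          simp only [hb, bne_iff_ne, ne_eq]
          intro h; exact ha (by simpa using h))]
        simp only [if_neg ha]
        rw [hveq, hweq]
        split_ifs with hgo
        · rfl
        · exact ih hrest
      · -- no 1 involved: the value is unchanged, neither side breaks
        have hveq : calc_value ((x.set i (x.getD j 0)).set j (x.getD i 0))
            = calcGen vConst x := by
          rw [calc_value_eq, hv, if_neg ha, if_neg hb, if_neg hb, if_neg ha]; ring
        rw [if_pos hab, if_neg (show ¬ (((x.getD i 0 == 1) != (x.getD j 0 == 1)) = true) by
          rw [beq_eq_false_iff_ne.mpr ha, beq_eq_false_iff_ne.mpr hb, bne_self_eq_false]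
          exact Bool.false_ne_true)]
        rw [if_neg (by rw [hveq]; rintro ⟨h1, -⟩; exact lt_irrefl _ h1)]
        exact ih hrest

theorem ports_eq (x : List Int) : fchc_transpose_neighbour x = fchc_transpose_neighbour_alt x := by
  unfold fchc_transpose_neighbour fchc_transpose_neighbour_alt
  rw [calc_value_eq, bTotal_eq, bTotal_eq]
  exact loop_eq x _ (combos_valid x.length)

-- ===== VERDICT (by name: the statement is the Claim_ definition above) =====
theorem fchc_transpose_neighbour_spec : Claim_equal_fchc_transpose_neighbour := by
  intro x _ _
  unfold Spec_fchc_transpose_neighbour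
  exact ports_eq x
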